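/- GENERATED by tools/mkcompositions.py from design/units.gif.tsv (unit `DGifGetScreenDesc.COMPOSITION`) — do not edit.
   THE PROOF of the composition unit `DGifGetScreenDesc.COMPOSITION`: the 8 segments of `DGifGetScreenDesc` chain into its contract, by the theorem
   `Gif.Spec.DGifGetScreenDesc.compose` (proved next to the cut assertions). -/
import Gif.Spec.Units.DGifGetScreenDesc_COMPOSITION

/-- The segments of `DGifGetScreenDesc` compose into its contract. -/
theorem Gif.Spec.Proved.DGifGetScreenDesc_COMPOSITION_ok : Gif.Spec.DGifGetScreenDesc_COMPOSITION.Statement := by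
  intro Lay _hLay μ _hμ u₀ h_DGifGetScreenDesc_P h_DGifGetScreenDesc_1 h_DGifGetScreenDesc_2 h_DGifGetScreenDesc_3 h_DGifGetScreenDesc_4 h_DGifGetScreenDesc_5 h_DGifGetScreenDesc_6 h_DGifGetScreenDesc_E
  apply Gif.Spec.DGifGetScreenDesc.compose
  all_goals assumption
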